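-- pv_equiv track=rewrite | github.com/GiovanniCapizzi/ticd-17-18 | webapp/ticd/algorithms/LZ77.py | _get_index_length
-- ===== SOURCE A (Python) =====
-- def _get_index_length(sb: str, lab: str):
--     """
--     >>> _get_index_length("", "test")
--     (0, 0)
--     >>> _get_index_length("t", "test")
--     (1, 1)
--     >>> _get_index_length("t_tes_", "test")
--     (4, 3)
--     """
--     index, tmp = None, None
--     for i in range(len(lab)):
--         tmp = lab[0:len(lab) - i]
--         if tmp in sb:
--             index = sb.rindex(tmp)
--             break
--     if index is None:
--         return 0, 0
--     else:
--         return len(sb) - index, len(tmp)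
-- ===== SOURCE B (Python) =====
-- def _get_index_length(sb: str, lab: str):
--     # One left-to-right scan over sb: for every start j compute the length of the
--     # longest common prefix of sb[j:] and lab, keeping the best length and the
--     # rightmost start achieving it (>= keeps the last argmax).
--     n, m = len(sb), len(lab)
--     best_l = best_j = 0
--     for j in range(n):
--         k = 0
--         while k < m and j + k < n and sb[j + k] == lab[k]:
--             k += 1
--         if k >= best_l:
--             best_l, best_j = k, j
--     if best_l == 0:
--         return 0, 0
--     return n - best_j, best_l
-- ===== Notes on version B (the rewrite author's own statement) =====
-- stated objective: faster
-- what changed: Replaces the shrinking-prefix loop of substring searches ('tmp in sb' + sb.rindex per candidate prefix length) with a single left-to-right scan over sb that computes the longest common prefix of sb[j:] and lab at each start j, keeping the best length and its rightmost start.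
import Mathlib
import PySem

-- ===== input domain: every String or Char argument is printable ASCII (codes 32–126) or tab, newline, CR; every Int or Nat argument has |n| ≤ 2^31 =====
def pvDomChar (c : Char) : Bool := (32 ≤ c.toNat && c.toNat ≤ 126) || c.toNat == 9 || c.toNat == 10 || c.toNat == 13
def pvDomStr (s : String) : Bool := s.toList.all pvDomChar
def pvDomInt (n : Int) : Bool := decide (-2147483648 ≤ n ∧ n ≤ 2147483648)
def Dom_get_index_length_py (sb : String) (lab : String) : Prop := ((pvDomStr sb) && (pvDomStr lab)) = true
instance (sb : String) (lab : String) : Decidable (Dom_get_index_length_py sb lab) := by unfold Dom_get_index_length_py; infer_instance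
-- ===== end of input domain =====

-- B replaces A's shrinking-prefix substring searches by one scan over sb tracking
-- the longest common prefix with lab at each start (measurably faster in a timing run, same results).

-- ===== PORT A =====
-- 'for i in range(len(lab)): tmp = lab[0:len(lab)-i]; if tmp in sb: index = sb.rindex(tmp); break'
-- sb.rindex(tmp) is ported as PySem.Chars.rfind: exact here because it only runs when 'tmp in sb' holds
def loopA (sb lab : List Char) : List Nat → Option (List Char × Int)
  | [] => none
  | i :: rest =>
      let tmp := PySem.List.slice lab (some 0) (some ((lab.length - i : Nat) : Int))
      if PySem.Chars.isIn tmp sb then some (tmp, PySem.Chars.rfind sb tmp)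
      else loopA sb lab rest

def get_index_length_py (sb : String) (lab : String) : List Int :=
  match loopA sb.toList lab.toList (List.range lab.toList.length) with
  | none => [0, 0]
  | some (tmp, index) => [(sb.toList.length : Int) - index, (tmp.length : Int)]

-- ===== PORT B =====
-- the inner 'while k < m and j + k < n and sb[j+k] == lab[k]' of Source B
def lcp : List Char → List Char → Nat
  | a :: as, b :: bs => if a = b then lcp as bs + 1 else 0
  | _, _ => 0

-- 'for j in range(n): k = lcp(sb[j:], lab); if k >= best_l: best_l, best_j = k, j'
def loopB (sb lab : List Char) (acc : Nat × Nat) : List Nat → Nat × Nat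
  | [] => acc
  | j :: rest =>
      let k := lcp (sb.drop j) lab
      loopB sb lab (if acc.1 ≤ k then (k, j) else acc) rest

def get_index_length_py_alt (sb : String) (lab : String) : List Int :=
  let s := sb.toList
  let r := loopB s lab.toList (0, 0) (List.range s.length)
  if r.1 = 0 then [0, 0] else [(s.length : Int) - (r.2 : Int), (r.1 : Int)]

-- ===== PRECONDITION & SPEC =====
def Spec_get_index_length_py (sb : String) (lab : String) (out : List Int) : Prop := out = get_index_length_py_alt sb lab
instance (sb : String) (lab : String) (out : List Int) : Decidable (Spec_get_index_length_py sb lab out) := by unfold Spec_get_index_length_py; infer_instance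

-- ===== CLAIM (what is proved, stated in full; the proofs are below) =====
def Claim_equal_get_index_length_py : Prop := ∀ (sb : String) (lab : String), Dom_get_index_length_py sb lab → Spec_get_index_length_py sb lab (get_index_length_py sb lab)

-- ===== LEMMAS AND PROOFS =====

theorem lcp_nil (b : List Char) : lcp [] b = 0 := by cases b <;> rfl

theorem lcp_nil' (a : List Char) : lcp a [] = 0 := by cases a <;> rfl

theorem lcp_cons (x y : Char) (as bs : List Char) :
    lcp (x :: as) (y :: bs) = if x = y then lcp as bs + 1 else 0 := rfl

theorem lcp_le_right (a b : List Char) : lcp a b ≤ b.length := by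
  induction a generalizing b with
  | nil => simp [lcp_nil]
  | cons x as ih =>
      cases b with
      | nil => simp [lcp_nil']
      | cons y bs =>
          rw [lcp_cons]
          split_ifs
          · simpa using ih bs
          · simp

-- k ≤ |b|: b.take k is a prefix of a  ↔  k ≤ lcp a b
theorem take_prefix_iff_lcp (a b : List Char) (k : Nat) (hk : k ≤ b.length) :
    (b.take k <+: a) ↔ k ≤ lcp a b := by
  induction a generalizing b k with
  | nil =>
      rw [lcp_nil]
      constructor
      · intro h
        have h0 : b.take k = [] := List.prefix_nil.mp h
        have hlen : (b.take k).length = 0 := by rw [h0]; rfl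
        simp only [List.length_take] at hlen
        omega
      · intro h
        have hk0 : k = 0 := Nat.le_zero.mp h
        subst hk0
        simp
  | cons x as ih =>
      cases b with
      | nil =>
          have hk0 : k = 0 := by simpa using hk
          subst hk0
          simp
      | cons y bs =>
          cases k with
          | zero => simp
          | succ k' =>
              rw [lcp_cons]
              simp only [List.take_succ_cons, List.cons_prefix_cons]
              by_cases hxy : x = y
              · subst hxy
                rw [if_pos rfl]
                constructor
                · rintro ⟨_, hp⟩
                  have := (ih bs k' (by simpa using hk)).mp hp
                  omega
                · intro h
                  exact ⟨rfl, (ih bs k' (by simpa using hk)).mpr (by omega)⟩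
              · rw [if_neg hxy]
                constructor
                · rintro ⟨h1, _⟩
                  exact (hxy h1.symm).elim
                · intro h
                  exact absurd h (by omega)

-- for 1 ≤ k ≤ |l|:  l.take k occurs in s  ↔  some start j < |s| matches k chars of l
theorem isIn_take_iff (s l : List Char) (k : Nat) (hk1 : 1 ≤ k) (hkm : k ≤ l.length) :
    PySem.Chars.isIn (l.take k) s = true ↔ ∃ j < s.length, k ≤ lcp (s.drop j) l := by
  rw [← PySem.Chars.exists_prefix_drop_iff_isIn]
  constructor
  · rintro ⟨j, hj⟩
    by_cases hjn : j < s.length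
    · exact ⟨j, hjn, (take_prefix_iff_lcp _ _ _ hkm).mp hj⟩
    · exfalso
      rw [List.drop_eq_nil_of_le (by omega)] at hj
      have : l.take k = [] := List.prefix_nil.mp hj
      have : min k l.length = 0 := by simpa using congrArg List.length this
      omega
  · rintro ⟨j, hjn, hle⟩
    exact ⟨j, (take_prefix_iff_lcp _ _ _ hkm).mpr hle⟩

theorem loopA_cons_of_true (sb lab : List Char) (i : Nat) (rest : List Nat)
    (h : PySem.Chars.isIn (PySem.List.slice lab (some 0) (some ((lab.length - i : Nat) : Int))) sb = true) :
    loopA sb lab (i :: rest) =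
      some (PySem.List.slice lab (some 0) (some ((lab.length - i : Nat) : Int)),
            PySem.Chars.rfind sb (PySem.List.slice lab (some 0) (some ((lab.length - i : Nat) : Int)))) := by
  simp only [loopA, h, if_pos]

-- loopA skips an all-false prefix of its index list
theorem loopA_append_false (sb lab : List Char) (pre js : List Nat)
    (h : ∀ i ∈ pre, PySem.Chars.isIn (PySem.List.slice lab (some 0) (some ((lab.length - i : Nat) : Int))) sb = false) :
    loopA sb lab (pre ++ js) = loopA sb lab js := by
  induction pre with
  | nil => rfl
  | cons i pre ih =>
      have hi := h i (by simp)
      simp only [List.cons_append, loopA, hi]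
      simp only [Bool.false_eq_true, if_false]
      exact ih (fun i hi' => h i (by simp [hi']))

-- B's loop on range t: running max of lcp and its last argmax
theorem loopB_range_spec (s l : List Char) (t : Nat) :
    (∀ j < t, lcp (s.drop j) l ≤ (loopB s l (0, 0) (List.range t)).1) ∧
    ((loopB s l (0, 0) (List.range t)).1 = 0 ∨
      ((loopB s l (0, 0) (List.range t)).2 < t ∧
       lcp (s.drop (loopB s l (0, 0) (List.range t)).2) l = (loopB s l (0, 0) (List.range t)).1 ∧
       ∀ j, (loopB s l (0, 0) (List.range t)).2 < j → j < t →
         lcp (s.drop j) l < (loopB s l (0, 0) (List.range t)).1)) := by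
  have happ : ∀ (acc : Nat × Nat) (xs ys : List Nat),
      loopB s l acc (xs ++ ys) = loopB s l (loopB s l acc xs) ys := by
    intro acc xs ys
    induction xs generalizing acc with
    | nil => rfl
    | cons x xs ih => simp only [List.cons_append, loopB]; exact ih _
  induction t with
  | zero => simp [loopB]
  | succ t ih =>
      rw [List.range_succ, happ]
      set r := loopB s l (0, 0) (List.range t) with hr
      obtain ⟨ih1, ih2⟩ := ih
      simp only [loopB]
      split_ifs with hcond
      · refine ⟨?_, Or.inr ⟨by omega, rfl, fun j h1 h2 => by omega⟩⟩
        intro j hj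
        rcases Nat.lt_succ_iff_lt_or_eq.mp hj with h | h
        · exact le_trans (ih1 j h) hcond
        · subst h; exact le_rfl
      · rw [Nat.not_le] at hcond
        have hr1 : r.1 ≠ 0 := by omega
        rcases ih2 with h0 | ⟨hlt, heq, hmax⟩
        · omega
        refine ⟨?_, Or.inr ⟨by omega, heq, ?_⟩⟩
        · intro j hj
          rcases Nat.lt_succ_iff_lt_or_eq.mp hj with h | h
          · exact ih1 j h
          · subst h; omega
        · intro j h1 h2
          rcases Nat.lt_succ_iff_lt_or_eq.mp h2 with h | h
          · exact hmax j h1 h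
          · subst h; omega

-- rfind's scan returns the highest start ≤ t at which sub is a prefix
theorem rfind_go_eq (s sub : List Char) (t j0 : Nat) (hj : j0 ≤ t)
    (hpre : sub <+: s.drop j0)
    (hmax : ∀ i, j0 < i → i ≤ t → ¬ sub <+: s.drop i) :
    PySem.Chars.rfind.go s sub t = (j0 : Int) := by
  induction t with
  | zero =>
      have : j0 = 0 := by omega
      subst this
      rw [PySem.Chars.rfind.go.eq_def]
      simp only [List.drop_zero] at hpre
      simp [List.isPrefixOf_iff_prefix.mpr hpre]
  | succ t ih =>
      rw [PySem.Chars.rfind.go.eq_def]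
      by_cases h : j0 = t + 1
      · subst h
        simp [List.isPrefixOf_iff_prefix.mpr hpre]
      · have hnot : ¬ sub <+: s.drop (t + 1) := hmax (t + 1) (by omega) le_rfl
        have hb : sub.isPrefixOf (List.drop (t + 1) s) = false :=
          Bool.eq_false_iff.mpr (fun hc => hnot (List.isPrefixOf_iff_prefix.mp hc))
        simp [hb]
        exact ih (by omega) (fun i h1 h2 => hmax i h1 (by omega))

-- ===== VERDICT (by name: the statement is the Claim_ definition above) =====
theorem get_index_length_py_spec : Claim_equal_get_index_length_py := by
  intro sb lab _
  unfold Spec_get_index_length_py get_index_length_py get_index_length_py_alt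
  simp only []
  set s := sb.toList with hs
  set l := lab.toList with hl
  set n := s.length with hn
  set m := l.length with hm
  obtain ⟨q1, q2⟩ := loopB_range_spec s l n
  set r := loopB s l (0, 0) (List.range n) with hr
  -- normalize A's candidate test
  have hslice : ∀ i : Nat, PySem.List.slice l (some 0) (some ((m - i : Nat) : Int)) = l.take (m - i) := by
    intro i
    rw [PySem.List.slice_zero_start, PySem.List.slice_to_natCast]
  by_cases hM : r.1 = 0
  · -- no nonempty prefix of l occurs in s: loopA never fires
    have hall : ∀ i ∈ List.range m,
        PySem.Chars.isIn (PySem.List.slice l (some 0) (some ((m - i : Nat) : Int))) s = false := by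
      intro i hi
      rw [hslice i]
      have him : i < m := List.mem_range.mp hi
      by_contra hc
      have htrue : PySem.Chars.isIn (l.take (m - i)) s = true := by
        cases h : PySem.Chars.isIn (l.take (m - i)) s
        · exact absurd h hc
        · rfl
      obtain ⟨j, hj, hle⟩ := (isIn_take_iff s l (m - i) (by omega) (by omega)).mp htrue
      have := q1 j hj
      omega
    have hnone : loopA s l (List.range m) = none := by
      have := loopA_append_false s l (List.range m) [] hall
      simpa using this
    rw [hnone, if_pos hM]
  · -- r.1 = M ≥ 1: A breaks at i = m - M with tmp = l.take M, rindex = r.2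
    rcases q2 with h0 | ⟨hlt, heq, hmax⟩
    · exact absurd h0 hM
    set M := r.1 with hMdef
    have hMm : M ≤ m := heq ▸ lcp_le_right _ _
    have hM1 : 1 ≤ M := by omega
    -- indices before m - M all fail
    have hpre_false : ∀ i ∈ List.range (m - M),
        PySem.Chars.isIn (PySem.List.slice l (some 0) (some ((m - i : Nat) : Int))) s = false := by
      intro i hi
      rw [hslice i]
      have him : i < m - M := List.mem_range.mp hi
      by_contra hc
      have htrue : PySem.Chars.isIn (l.take (m - i)) s = true := by
        cases h : PySem.Chars.isIn (l.take (m - i)) s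
        · exact absurd h hc
        · rfl
      obtain ⟨j, hj, hle⟩ := (isIn_take_iff s l (m - i) (by omega) (by omega)).mp htrue
      have := q1 j hj
      omega
    -- index m - M fires
    have hMi : m - (m - M) = M := by omega
    have hprefix : l.take M <+: s.drop r.2 :=
      (take_prefix_iff_lcp _ _ _ hMm).mpr (by omega)
    have hhit : PySem.Chars.isIn (l.take M) s = true :=
      (isIn_take_iff s l M hM1 hMm).mpr ⟨r.2, hlt, by omega⟩
    have hrange : List.range m = List.range (m - M) ++ (m - M) :: List.range' (m - M + 1) (M - 1) := by
      obtain ⟨i, hi⟩ : ∃ i, m = i + M := ⟨m - M, by omega⟩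
      rw [hi, Nat.add_sub_cancel, List.range_eq_range', ← List.range'_append_1]
      congr 1
      · exact List.range_eq_range'.symm
      · rw [show M = (M - 1) + 1 by omega, List.range'_succ]
        simp
    have hloopA : loopA s l (List.range m) = some (l.take M, PySem.Chars.rfind s (l.take M)) := by
      have hcond : PySem.Chars.isIn (PySem.List.slice l (some 0) (some ((l.length - (m - M) : Nat) : Int))) s = true := by
        rw [show l.length - (m - M) = m - (m - M) from rfl, hslice (m - M), hMi]
        exact hhit
      rw [hrange, loopA_append_false s l _ _ hpre_false, loopA_cons_of_true s l (m - M) _ hcond]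
      rw [show l.length - (m - M) = m - (m - M) from rfl, hslice (m - M), hMi]
    -- rfind finds exactly r.2 (the rightmost start matching M chars)
    have hrfind : PySem.Chars.rfind s (l.take M) = (r.2 : Int) := by
      unfold PySem.Chars.rfind
      refine rfind_go_eq s (l.take M) n r.2 (by omega) hprefix ?_
      intro i h1 h2 hcontra
      by_cases hin : i < n
      · have := (take_prefix_iff_lcp (s.drop i) l M hMm).mp hcontra
        have := hmax i h1 hin
        omega
      · have hi : i = n := by omega
        subst hi
        rw [List.drop_eq_nil_of_le (le_refl n)] at hcontra
        have h3 : l.take M = [] := List.prefix_nil.mp hcontra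
        have h4 : (l.take M).length = 0 := by rw [h3]; rfl
        simp only [List.length_take] at h4
        omega
    have hlen : ((l.take M).length : Int) = (M : Int) := by
      simp only [List.length_take]
      omega
    rw [hloopA]
    show [(n : Int) - PySem.Chars.rfind s (l.take M), ((l.take M).length : Int)] = _
    rw [hrfind, hlen, if_neg hM]
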